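-- pv_equiv track=rewrite | github.com/0xZeroWave/yanez_internal_scoring | app/utils/rule_applier.py | generate_remove_title
-- ===== SOURCE A (Python) =====
-- def generate_remove_title(original_name: str) -> str:
--     """Generate a variation by removing a title"""
--     titles = ["Mr.", "Mrs.", "Ms.", "Mr", "Mrs", "Ms", "Miss", "Dr.", "Dr",
--               "Prof.", "Prof", "Sir", "Lady", "Lord", "Dame", "Master", "Mistress",
--               "Rev.", "Hon.", "Capt.", "Col.", "Lt.", "Sgt.", "Maj."]
--
--     for title in titles:
--         if original_name.startswith(title + " "):
--             return original_name[len(title)+1:]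
--
--     return original_name
-- ===== SOURCE B (Python) =====
-- _TITLES = frozenset(["Mr.", "Mrs.", "Ms.", "Mr", "Mrs", "Ms", "Miss", "Dr.", "Dr",
--                      "Prof.", "Prof", "Sir", "Lady", "Lord", "Dame", "Master", "Mistress",
--                      "Rev.", "Hon.", "Capt.", "Col.", "Lt.", "Sgt.", "Maj."])
--
-- def generate_remove_title(original_name: str) -> str:
--     """Generate a variation by removing a title"""
--     head, sep, tail = original_name.partition(' ')
--     if sep and head in _TITLES:
--         return tail
--     return original_name
-- ===== Notes on version B (the rewrite author's own statement) =====
-- stated objective: idiomatic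
-- what changed: Instead of scanning all 24 titles and testing a startswith prefix check for each, B splits the name at its first space once with str.partition and does a single membership lookup of the first token in a precomputed frozenset; the per-title prefix-scan loop disappears entirely.
import Mathlib
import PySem

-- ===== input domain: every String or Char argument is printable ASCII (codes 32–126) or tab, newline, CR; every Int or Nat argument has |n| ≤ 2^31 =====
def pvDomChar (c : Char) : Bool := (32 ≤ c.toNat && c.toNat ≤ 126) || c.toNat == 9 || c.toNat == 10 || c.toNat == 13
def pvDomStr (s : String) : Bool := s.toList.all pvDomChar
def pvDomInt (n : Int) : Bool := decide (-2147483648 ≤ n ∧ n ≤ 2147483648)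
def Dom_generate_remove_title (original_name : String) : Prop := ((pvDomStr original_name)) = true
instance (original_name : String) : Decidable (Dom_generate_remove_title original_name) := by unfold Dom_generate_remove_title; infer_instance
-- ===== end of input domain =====

-- ===== PORT A =====
-- B replaces A's 24-way startswith scan by one partition at the first space plus a set lookup (idiomatic; same results).
def pvTitles : List (List Char) :=
  ["Mr.", "Mrs.", "Ms.", "Mr", "Mrs", "Ms", "Miss", "Dr.", "Dr",
   "Prof.", "Prof", "Sir", "Lady", "Lord", "Dame", "Master", "Mistress",
   "Rev.", "Hon.", "Capt.", "Col.", "Lt.", "Sgt.", "Maj."].map String.toList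

-- the 'for title in titles' loop: first title with original_name.startswith(title + " ") wins
def pvLoopA (name : List Char) : List (List Char) -> List Char
  | [] => name
  | t :: rest =>
    if PySem.Chars.startswith name (t ++ [' ']) then
      name.drop (t.length + 1)      -- original_name[len(title)+1:] (nonnegative index: drop is exact)
    else pvLoopA name rest

def generate_remove_title (original_name : String) : String :=
  String.ofList (pvLoopA original_name.toList pvTitles)

-- ===== PORT B =====
def pvTitleSet : PySem.Set (List Char) := PySem.Set.ofList pvTitles

def generate_remove_title_alt (original_name : String) : String :=
  -- head, sep, tail = original_name.partition(' '); exact hand port for the single-char separator: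
  -- head = chars before the first space, tail = chars after it, sep nonempty iff a space occurs
  let l := original_name.toList
  let head := l.takeWhile (fun c => c != ' ')
  match l.dropWhile (fun c => c != ' ') with
  | [] => original_name                      -- no space: sep == '', return unchanged
  | _ :: tail =>
    if PySem.Set.contains pvTitleSet head then String.ofList tail else original_name

-- ===== PRECONDITION & SPEC =====
def Spec_generate_remove_title (original_name : String) (out : String) : Prop := out = generate_remove_title_alt original_name
instance (original_name : String) (out : String) : Decidable (Spec_generate_remove_title original_name out) := by unfold Spec_generate_remove_title; infer_instance

-- ===== CLAIM (what is proved, stated in full; the proofs are below) =====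
def Claim_equal_generate_remove_title : Prop := ∀ (original_name : String), Dom_generate_remove_title original_name → Spec_generate_remove_title original_name (generate_remove_title original_name)

-- ===== LEMMAS AND PROOFS =====

-- if a space occurs in l, then (first token ++ [' ']) is a prefix of l, and the partition tail is what follows it
theorem pv_head_prefix (l : List Char) (c : Char) (tl : List Char)
    (h : l.dropWhile (fun c => c != ' ') = c :: tl) :
    l = l.takeWhile (fun c => c != ' ') ++ ' ' :: tl := by
  have hc : c = ' ' := by
    have := List.head_dropWhile_not (l := l) (p := fun c => c != ' ') (by simp [h])
    simpa [h] using this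
  conv_lhs => rw [← List.takeWhile_append_dropWhile (p := fun c => c != ' ') (l := l)]
  rw [h, hc]

-- for a space-free title t, matching "t + ' '" as a prefix pins down the partition of l
theorem pv_match_characterize (l t : List Char) (ht : (' ' : Char) ∉ t)
    (hm : PySem.Chars.startswith l (t ++ [' ']) = true) :
    ∃ r, l = t ++ ' ' :: r ∧ l.takeWhile (fun c => c != ' ') = t ∧
         l.dropWhile (fun c => c != ' ') = ' ' :: r := by
  rcases (PySem.Chars.startswith_iff l (t ++ [' '])).1 hm with ⟨r, hr⟩
  refine ⟨r, by simpa using hr.symm, ?_, ?_⟩ <;>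
  · subst hr
    have hall : ∀ c ∈ t, (fun c => c != ' ') c = true := by
      intro c hcmem; simp; rintro rfl; exact ht hcmem
    simp [List.takeWhile_append_of_pos hall, List.dropWhile_append_of_pos hall]

-- the loop over any list of space-free titles equals partition + membership
theorem pv_loop_eq (l : List Char) (ts : List (List Char)) (ht : ∀ t ∈ ts, (' ' : Char) ∉ t) :
    pvLoopA l ts =
      match l.dropWhile (fun c => c != ' ') with
      | [] => l
      | _ :: tail => if ts.contains (l.takeWhile (fun c => c != ' ')) then tail else l := by
  induction ts with
  | nil =>
    cases h : l.dropWhile (fun c => c != ' ') <;> simp [pvLoopA]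
  | cons t rest ih =>
    by_cases hm : PySem.Chars.startswith l (t ++ [' ']) = true
    · rcases pv_match_characterize l t (ht t (by simp)) hm with ⟨r, hl, htake, hdrop⟩
      rw [show pvLoopA l (t :: rest) = l.drop (t.length + 1) by simp [pvLoopA, hm]]
      rw [hdrop, htake]
      have hc : (t :: rest).contains t = true := by simp
      simp only [hc, if_true]
      rw [hl, show t ++ ' ' :: r = (t ++ [' ']) ++ r by simp,
          show t.length + 1 = (t ++ [' ']).length by simp]
      exact List.drop_left
    · rw [show pvLoopA l (t :: rest) = pvLoopA l rest by simp [pvLoopA, hm]]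
      rw [ih (fun u hu => ht u (by simp [hu]))]
      cases hd : l.dropWhile (fun c => c != ' ') with
      | nil => rfl
      | cons c tl =>
        have hne : l.takeWhile (fun c => c != ' ') ≠ t := by
          intro he
          apply hm
          rw [PySem.Chars.startswith_iff]
          exact ⟨tl, by rw [← he]; simpa using (pv_head_prefix l c tl hd).symm⟩
        simp [hne]

theorem pv_titles_no_space : ∀ t ∈ pvTitles, (' ' : Char) ∉ t := by decide

theorem pv_set_eq : pvTitleSet = pvTitles := by decide

-- ===== VERDICT (by name: the statement is the Claim_ definition above) =====
theorem generate_remove_title_spec : Claim_equal_generate_remove_title := by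
  intro s _
  unfold Spec_generate_remove_title generate_remove_title generate_remove_title_alt
  rw [pv_loop_eq s.toList pvTitles pv_titles_no_space]
  cases h : s.toList.dropWhile (fun c => c != ' ') with
  | nil => simp [h, String.ofList_toList]
  | cons c tl =>
    simp only [h, PySem.Set.contains, pv_set_eq]
    split <;> simp [String.ofList_toList]
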